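-- pv_equiv track=rewrite | github.com/cpti372/python_code | 0417.py | pro2
-- ===== SOURCE A (Python) =====
-- def pro2(n):
--     case=0
--     for i in range(1,n+1):
--         num=i
--         while num%10==1:
--             if num %10 ==1:
--                 case+=1
--             num=num//10
--     return case
-- ===== SOURCE B (Python) =====
-- def pro2(n):
--     total = 0
--     rep, p = 1, 10
--     while rep <= n:
--         total += (n - rep) // p + 1
--         rep = rep * 10 + 1
--         p *= 10
--     return total
-- ===== Notes on version B (the rewrite author's own statement) =====
-- stated objective: faster
-- what changed: Instead of scanning every i in 1..n and stripping its trailing 1-digits, B counts for each repunit length k how many numbers in 1..n end in the k-digit repunit via one floor division, summing over k while the repunit is at most n.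
import Mathlib
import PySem

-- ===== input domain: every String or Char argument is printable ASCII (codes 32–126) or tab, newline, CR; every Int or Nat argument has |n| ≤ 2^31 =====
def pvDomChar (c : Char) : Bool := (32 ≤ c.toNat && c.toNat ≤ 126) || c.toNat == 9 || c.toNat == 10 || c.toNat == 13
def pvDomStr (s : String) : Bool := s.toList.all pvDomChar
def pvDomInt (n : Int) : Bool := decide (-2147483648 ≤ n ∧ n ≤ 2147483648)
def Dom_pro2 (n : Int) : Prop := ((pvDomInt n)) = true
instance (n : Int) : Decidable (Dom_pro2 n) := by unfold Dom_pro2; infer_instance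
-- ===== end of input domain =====

-- B replaces A's per-number scan of 1..n by a per-repunit-length count (one floor
-- division for each repunit ≤ n), an asymptotically faster exact computation.

-- ===== PORT A =====
-- inner 'while num%10==1: case+=1; num//=10' (the inner 'if' repeats the loop guard)
def pyTrail (num : Int) (case_ : Int) : Int :=
  if PySem.Int.mod num 10 = 1 then
    pyTrail (PySem.Int.floordiv num 10) (case_ + 1)
  else case_
termination_by num.natAbs
decreasing_by
  rename_i h
  rw [PySem.Int.mod_eq_emod_of_pos (by norm_num)] at h
  rw [PySem.Int.floordiv_eq_ediv_of_pos (by norm_num)]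
  omega

def pro2 (n : Int) : Int :=
  (PySem.List.pyRange 1 (n + 1) 1).foldl (fun case_ i => pyTrail i case_) 0

-- ===== PORT B =====
-- 'while rep <= n: total += (n-rep)//p + 1; rep = rep*10+1; p *= 10'
-- (rep and p are the always-nonnegative loop variables, carried as Nat)
def altLoop (n : Int) (rep p : Nat) (total : Int) : Int :=
  if (rep : Int) ≤ n then
    altLoop n (rep * 10 + 1) (p * 10) (total + PySem.Int.floordiv (n - rep) p + 1)
  else total
termination_by (n + 1 - rep).toNat
decreasing_by
  rename_i h
  have : ((rep * 10 + 1 : Nat) : Int) = (rep : Int) * 10 + 1 := by push_cast; ring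
  omega

def pro2_alt (n : Int) : Int := altLoop n 1 10 0

-- ===== PRECONDITION & SPEC =====
def Spec_pro2 (n : Int) (out : Int) : Prop := out = pro2_alt n
instance (n : Int) (out : Int) : Decidable (Spec_pro2 n out) := by unfold Spec_pro2; infer_instance

-- ===== CLAIM (what is proved, stated in full; the proofs are below) =====
def Claim_equal_pro2 : Prop := ∀ (n : Int), Dom_pro2 n → Spec_pro2 n (pro2 n)

-- ===== LEMMAS AND PROOFS =====

-- k-indexed repunits 1, 11, 111, … and powers 10, 100, …
def repu : Nat → Int
  | 0 => 1
  | k + 1 => 10 * repu k + 1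

def pw : Nat → Int
  | 0 => 10
  | k + 1 => 10 * pw k

theorem repu_pos (k : Nat) : 1 ≤ repu k := by
  induction k with
  | zero => simp [repu]
  | succ k ih => simp only [repu]; omega

theorem pw_pos (k : Nat) : 0 < pw k := by
  induction k with
  | zero => simp [pw]
  | succ k ih => simp only [pw]; omega

theorem repu_lt_pw (k : Nat) : repu k < pw k := by
  induction k with
  | zero => simp [repu, pw]
  | succ k ih => simp only [repu, pw]; omega

theorem repu_succ_eq (k : Nat) : repu (k + 1) = repu k + pw k := by
  induction k with
  | zero => simp [repu, pw]
  | succ k ih => simp only [repu, pw] at *; omega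

-- sum of counts over repunit lengths ≥ k (what B computes from level k on)
def S (n : Int) (k : Nat) : Int :=
  if repu k ≤ n then (n - repu k) / pw k + 1 + S n (k + 1) else 0
termination_by (n + 1 - repu k).toNat
decreasing_by
  rename_i h
  have h1 := repu_pos k
  have h2 : repu (k + 1) = 10 * repu k + 1 := rfl
  omega

-- number of levels j ≥ k at which n ends in the j-th repunit (trailing-ones from level k)
def W (n : Int) (k : Nat) : Int :=
  if repu k ≤ n ∧ n % pw k = repu k then 1 + W n (k + 1) else 0
termination_by (n + 1 - repu k).toNat
decreasing_by
  rename_i h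
  have h1 := repu_pos k
  have h2 : repu (k + 1) = 10 * repu k + 1 := rfl
  omega

-- the residue condition in divisibility form
theorem mod_eq_repu_iff (n : Int) (k : Nat) (hn : 0 ≤ n) :
    n % pw k = repu k ↔ pw k ∣ (n - repu k) := by
  have hp := pw_pos k
  have h1 := repu_pos k
  have h2 := repu_lt_pw k
  have hrr : repu k % pw k = repu k := Int.emod_eq_of_lt (by omega) h2
  constructor
  · intro h
    apply Int.dvd_of_emod_eq_zero
    rw [Int.sub_emod, h, hrr]
    simp
  · intro h
    obtain ⟨c, hc⟩ := h
    have : n = repu k + pw k * c := by omega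
    rw [this, Int.add_mul_emod_self_left, hrr]

-- floor-division step: how (n-r)/p changes from n-1 to n
theorem div_step (n r p : Int) (hp : 0 < p) (hr : 0 ≤ r) (h : r + 1 ≤ n) :
    (n - r) / p = (n - 1 - r) / p + (if p ∣ (n - r) then 1 else 0) := by
  set a := n - r with ha
  have ha1 : 1 ≤ a := by omega
  have hs0 : 0 ≤ a % p := Int.emod_nonneg a (by omega)
  have hsp : a % p < p := Int.emod_lt_of_pos a hp
  have hq : p * (a / p) + a % p = a := Int.ediv_add_emod a p
  set q := a / p with hqdef
  set s := a % p with hsdef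
  by_cases hd : p ∣ a
  · have hs : s = 0 := by
      rw [hsdef]; exact Int.emod_eq_zero_of_dvd hd
    have hq1 : 1 ≤ q := by nlinarith
    simp only [hd, if_pos]
    have hd1 : a - 1 = (p - 1) + p * (q - 1) := by
      have : p * (q - 1) = p * q - p := by ring
      omega
    have h2 : (n - 1 - r) = a - 1 := by omega
    rw [h2, hd1, Int.add_mul_ediv_left _ _ (by omega : p ≠ 0),
      Int.ediv_eq_zero_of_lt (by omega) (by omega)]
    omega
  · have hs : 1 ≤ s := by
      rcases Int.lt_or_le 0 s with h1 | h1
      · omega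
      · exact absurd (Int.dvd_of_emod_eq_zero (by omega)) hd
    simp only [hd, if_neg, not_false_iff]
    have hd1 : a - 1 = (s - 1) + p * q := by omega
    have h2 : (n - 1 - r) = a - 1 := by omega
    rw [h2, hd1, Int.add_mul_ediv_left _ _ (by omega : p ≠ 0),
      Int.ediv_eq_zero_of_lt (by omega) (by omega)]
    omega

-- nesting: ending in the (k+1)-repunit implies ending in the k-repunit
theorem nest (n : Int) (k : Nat) (h : n % pw (k + 1) = repu (k + 1)) :
    n % pw k = repu k := by
  have hp := pw_pos k
  have h1 := repu_pos k
  have h2 := repu_lt_pw k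
  have hd : pw k ∣ pw (k + 1) := ⟨10, by simp [pw]; ring⟩
  have := Int.emod_emod_of_dvd n hd
  rw [h, repu_succ_eq] at this
  rw [← this, show repu k + pw k = repu k + pw k * 1 by ring,
    Int.add_mul_emod_self_left, Int.emod_eq_of_lt (by omega) h2]

-- B's level sum steps by the trailing-ones count W
theorem S_unfold_pos (n : Int) (k : Nat) (h : repu k ≤ n) :
    S n k = (n - repu k) / pw k + 1 + S n (k + 1) := by rw [S, if_pos h]

theorem S_unfold_neg (n : Int) (k : Nat) (h : ¬ repu k ≤ n) : S n k = 0 := by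
  rw [S, if_neg h]

theorem W_unfold_pos (n : Int) (k : Nat) (h : repu k ≤ n ∧ n % pw k = repu k) :
    W n k = 1 + W n (k + 1) := by rw [W, if_pos h]

theorem W_unfold_neg (n : Int) (k : Nat) (h : ¬ (repu k ≤ n ∧ n % pw k = repu k)) :
    W n k = 0 := by rw [W, if_neg h]

theorem S_step (k : Nat) (n : Int) (hn : 1 ≤ n) : S n k = S (n - 1) k + W n k := by
  have hp := pw_pos k
  have h1 := repu_pos k
  have h2 := repu_lt_pw k
  by_cases h : repu k ≤ n
  · by_cases h' : repu k ≤ n - 1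
    · have ih := S_step (k + 1) n hn
      rw [S_unfold_pos n k h, S_unfold_pos (n - 1) k h', ih]
      by_cases hm : n % pw k = repu k
      · have hd : pw k ∣ (n - repu k) := (mod_eq_repu_iff n k (by omega)).1 hm
        rw [W_unfold_pos n k ⟨h, hm⟩]
        have hds := div_step n (repu k) (pw k) hp (by omega) (by omega)
        rw [if_pos hd] at hds
        omega
      · have hw1 : W n k = 0 := W_unfold_neg n k (by tauto)
        have hw2 : W n (k + 1) = 0 := by
          apply W_unfold_neg
          intro ⟨_, hc⟩
          exact hm (nest n k hc)
        have hds := div_step n (repu k) (pw k) hp (by omega) (by omega)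
        rw [if_neg (fun hd => hm ((mod_eq_repu_iff n k (by omega)).2 hd))] at hds
        omega
    · -- repu k = n exactly
      have he : repu k = n := by omega
      have hnext : ¬ repu (k + 1) ≤ n := by
        have hx : repu (k + 1) = 10 * repu k + 1 := rfl
        omega
      have hmod : n % pw k = repu k := by
        rw [Int.emod_eq_of_lt (by omega) (by omega)]; omega
      have hnd : ¬ (repu (k + 1) ≤ n ∧ n % pw (k + 1) = repu (k + 1)) := by tauto
      rw [S_unfold_pos n k h, S_unfold_neg (n - 1) k h', S_unfold_neg n (k + 1) hnext,
        W_unfold_pos n k ⟨h, hmod⟩, W_unfold_neg n (k + 1) hnd]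
      rw [show n - repu k = 0 by omega, Int.zero_ediv]
      omega
  · have h' : ¬ repu k ≤ n - 1 := by omega
    rw [S_unfold_neg n k h, S_unfold_neg (n - 1) k h', W_unfold_neg n k (by tauto)]
    omega
termination_by (n + 1 - repu k).toNat
decreasing_by
  have h1 := repu_pos k
  have h2 : repu (k + 1) = 10 * repu k + 1 := rfl
  omega

-- shifting one digit: W at level k+1 of 10q+1 is W at level k of q
theorem W_shift (k : Nat) (q : Int) (hq : 0 ≤ q) : W (10 * q + 1) (k + 1) = W q k := by
  have hp := pw_pos k
  have h1 := repu_pos k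
  have h2 := repu_lt_pw k
  have hrs : repu (k + 1) = 10 * repu k + 1 := rfl
  have hps : pw (k + 1) = 10 * pw k := rfl
  have hle : (repu (k + 1) ≤ 10 * q + 1) ↔ (repu k ≤ q) := by omega
  have hs0 : 0 ≤ q % pw k := Int.emod_nonneg q (by omega)
  have hsp : q % pw k < pw k := Int.emod_lt_of_pos q hp
  have hqe := Int.ediv_add_emod q (pw k)
  have hmod : (10 * q + 1) % pw (k + 1) = 10 * (q % pw k) + 1 := by
    rw [hps]
    have hmul : (10 * pw k) * (q / pw k) = 10 * (pw k * (q / pw k)) := by ring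
    have : 10 * q + 1 = (10 * (q % pw k) + 1) + (10 * pw k) * (q / pw k) := by omega
    rw [this, Int.add_mul_emod_self_left, Int.emod_eq_of_lt (by omega) (by omega)]
  have hmeq : ((10 * q + 1) % pw (k + 1) = repu (k + 1)) ↔ (q % pw k = repu k) := by
    rw [hmod, hrs]; omega
  by_cases hc : repu k ≤ q ∧ q % pw k = repu k
  · rw [W_unfold_pos (10 * q + 1) (k + 1) ⟨hle.2 hc.1, hmeq.2 hc.2⟩,
      W_unfold_pos q k hc, W_shift (k + 1) q hq]
  · rw [W_unfold_neg (10 * q + 1) (k + 1) (fun ⟨hx, hy⟩ => hc ⟨hle.1 hx, hmeq.1 hy⟩),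
      W_unfold_neg q k hc]
termination_by (q + 1 - repu k).toNat
decreasing_by
  have h1 := repu_pos k
  have h2 : repu (k + 1) = 10 * repu k + 1 := rfl
  omega

-- A's inner while loop computes the trailing-ones count W · 0
theorem pyTrail_eq (n : Int) (hn : 0 ≤ n) (c : Int) : pyTrail n c = c + W n 0 := by
  rw [pyTrail]
  by_cases h : PySem.Int.mod n 10 = 1
  · rw [if_pos h]
    rw [PySem.Int.mod_eq_emod_of_pos (by norm_num)] at h
    rw [PySem.Int.floordiv_eq_ediv_of_pos (by norm_num)]
    set q := n / 10 with hqdef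
    have hqe : n = 10 * q + 1 := by omega
    have hq0 : 0 ≤ q := by omega
    have hn1 : 1 ≤ n := by omega
    have ih := pyTrail_eq q hq0 (c + 1)
    rw [ih]
    have hw : W n 0 = 1 + W n 1 := by
      rw [W_unfold_pos n 0 ⟨by simp [repu]; omega, by simp [pw, repu]; omega⟩]
    have hsh := W_shift 0 q hq0
    rw [← hqe] at hsh
    norm_num at hsh hw ⊢
    omega
  · rw [if_neg h]
    rw [PySem.Int.mod_eq_emod_of_pos (by norm_num)] at h
    have : W n 0 = 0 := by
      apply W_unfold_neg
      intro ⟨_, hc⟩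
      simp [pw, repu] at hc
      exact h hc
    omega
termination_by n.toNat
decreasing_by omega

-- A's outer loop equals the level sum S · 0
theorem pro2_eq_S (n : Int) : pro2 n = S n 0 := by
  by_cases h : 1 ≤ n
  · have hsplit : PySem.List.pyRange 1 (n + 1) 1 = PySem.List.pyRange 1 n 1 ++ [n] :=
      PySem.List.pyRange_one_succ_right (by omega)
    have ih := pro2_eq_S (n - 1)
    have hprev : PySem.List.pyRange 1 ((n - 1) + 1) 1 = PySem.List.pyRange 1 n 1 := by
      norm_num
    rw [pro2, hsplit, List.foldl_append]
    have : (PySem.List.pyRange 1 n 1).foldl (fun case_ i => pyTrail i case_) 0 = pro2 (n - 1) := by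
      rw [pro2, hprev]
    rw [this, List.foldl_cons, List.foldl_nil, pyTrail_eq n (by omega), ih, S_step 0 n h]
  · have hnil : PySem.List.pyRange 1 (n + 1) 1 = [] :=
      PySem.List.pyRange_one_eq_nil (by omega)
    have hS : S n 0 = 0 := by
      rw [S, if_neg]; show ¬ repu 0 ≤ n; simp [repu]; omega
    rw [pro2, hnil, List.foldl_nil, hS]
termination_by n.toNat
decreasing_by omega

-- Nat mirrors of repu/pw matching B's loop variables
def repN : Nat → Nat
  | 0 => 1
  | k + 1 => repN k * 10 + 1

def pwN : Nat → Nat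
  | 0 => 10
  | k + 1 => pwN k * 10

theorem repN_cast (k : Nat) : ((repN k : Int)) = repu k := by
  induction k with
  | zero => simp [repN, repu]
  | succ k ih => simp only [repN, repu]; push_cast; omega

theorem pwN_cast (k : Nat) : ((pwN k : Int)) = pw k := by
  induction k with
  | zero => simp [pwN, pw]
  | succ k ih => simp only [pwN, pw]; push_cast; omega

-- B's loop accumulates S from any level
theorem altLoop_eq (k : Nat) (n total : Int) :
    altLoop n (repN k) (pwN k) total = total + S n k := by
  have hc := repN_cast k
  have hpc := pwN_cast k
  have hp := pw_pos k
  by_cases h : repu k ≤ n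
  · rw [altLoop, if_pos (by rw [hc]; exact h)]
    have hrs : repN k * 10 + 1 = repN (k + 1) := rfl
    have hps : pwN k * 10 = pwN (k + 1) := rfl
    rw [hrs, hps, altLoop_eq (k + 1) n _, S_unfold_pos n k h,
      PySem.Int.floordiv_eq_ediv_of_pos (show (0 : Int) < (pwN k : Int) by omega), hc, hpc]
    ring
  · rw [altLoop, if_neg (by rw [hc]; exact h), S_unfold_neg n k h]
    ring
termination_by (n + 1 - repu k).toNat
decreasing_by
  have h1 := repu_pos k
  have h2 : repu (k + 1) = 10 * repu k + 1 := rfl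
  omega

theorem pro2_alt_eq_S (n : Int) : pro2_alt n = S n 0 := by
  have := altLoop_eq 0 n 0
  simpa [pro2_alt, repN, pwN] using this

-- ===== VERDICT (by name: the statement is the Claim_ definition above) =====
theorem pro2_spec : Claim_equal_pro2 := by
  intro n _
  unfold Spec_pro2
  rw [pro2_eq_S, pro2_alt_eq_S]
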